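-- pv_equiv track=rewrite | github.com/SegFault2017/Leetcode2020 | 336.palindrome-pairs.py | all_valid_prefixes
-- ===== SOURCE A (Python) =====
-- def all_valid_prefixes(word: str) -> str:
--     n = len(word)
--     for i in range(n):
--         sub_word = word[i:]
--         reversed = sub_word[::-1]
--         if sub_word == reversed:
--             yield word[:i]
--     pass
-- ===== SOURCE B (Python) =====
-- def all_valid_prefixes(word: str) -> str:
--     # Encode each suffix and its reverse as big integers in base 1114112 (one
--     # right-to-left pass); suffix is a palindrome iff the two codes are equal.
--     n = len(word)
--     f = 0            # code of word[n-k:], most significant digit first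
--     r = 0            # code of reversed(word[n-k:])
--     p = 1            # 1114112 ** k
--     k = 0
--     lens = []        # palindromic suffix lengths, ascending
--     for c in map(ord, reversed(word)):
--         f = c * p + f
--         r = r * 1114112 + c
--         p = p * 1114112
--         k = k + 1
--         if f == r:
--             lens.append(k)
--     for length in reversed(lens):
--         yield word[:n - length]
-- ===== Notes on version B (the rewrite author's own statement) =====
-- stated objective: alternative
-- what changed: Instead of slicing out each suffix and comparing it with its reversal, B makes one right-to-left pass that encodes the current suffix and its reverse as exact base-1114112 big integers (plus the running power and length), records the lengths where the two codes coincide, and emits the corresponding prefixes.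
import Mathlib
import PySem

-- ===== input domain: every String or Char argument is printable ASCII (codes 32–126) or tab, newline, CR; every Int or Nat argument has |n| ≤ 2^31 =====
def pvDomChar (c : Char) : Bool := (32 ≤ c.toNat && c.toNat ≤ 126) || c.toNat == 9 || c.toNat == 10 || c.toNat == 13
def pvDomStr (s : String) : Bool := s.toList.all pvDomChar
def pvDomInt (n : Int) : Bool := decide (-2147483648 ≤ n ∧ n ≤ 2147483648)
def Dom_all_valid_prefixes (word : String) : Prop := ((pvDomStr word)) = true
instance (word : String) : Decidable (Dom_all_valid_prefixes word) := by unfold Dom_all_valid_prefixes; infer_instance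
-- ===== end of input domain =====

-- B replaces A's quadratic slice-reverse-and-compare per suffix by a single right-to-left
-- pass encoding each suffix and its reverse as base-1114112 integers (alternative algorithm,
-- same asymptotic cost).

-- ===== PORT A =====
def all_valid_prefixes (word : String) : List String :=
  let n : Int := PySem.Str.len word
  (PySem.List.pyRange 0 n 1).foldl
    (fun acc i =>
      let sub_word := PySem.Str.slice word (some i) none
      let rev := (PySem.Str.slice? sub_word none none (-1)).getD ""   -- step ≠ 0, never none
      if sub_word = rev then acc ++ [PySem.Str.slice word none (some i)] else acc)
    []

-- ===== PORT B =====
-- state (f, r, p, k, lens) as in Source B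
def all_valid_prefixes_alt (word : String) : List String :=
  let n : Int := PySem.Str.len word
  let st := word.toList.reverse.foldl
    (fun (st : Int × Int × Int × Int × List Int) c =>
      let f := (c.toNat : Int) * st.2.2.1 + st.1
      let r := st.2.1 * 1114112 + (c.toNat : Int)
      let p := st.2.2.1 * 1114112
      let k := st.2.2.2.1 + 1
      let lens := if f = r then st.2.2.2.2 ++ [k] else st.2.2.2.2
      (f, r, p, k, lens))
    (0, 0, 1, 0, ([] : List Int))
  st.2.2.2.2.reverse.foldl (fun acc L => acc ++ [PySem.Str.slice word none (some (n - L))]) []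

-- ===== PRECONDITION & SPEC =====
def Spec_all_valid_prefixes (word : String) (out : List String) : Prop := out = all_valid_prefixes_alt word
instance (word : String) (out : List String) : Decidable (Spec_all_valid_prefixes word out) := by unfold Spec_all_valid_prefixes; infer_instance

-- ===== CLAIM (what is proved, stated in full; the proofs are below) =====
def Claim_equal_all_valid_prefixes : Prop := ∀ (word : String), Dom_all_valid_prefixes word → Spec_all_valid_prefixes word (all_valid_prefixes word)

-- ===== LEMMAS AND PROOFS =====

-- value of a char list read as a base-1114112 number, most significant digit first
def pvVal : List Char → Int
  | [] => 0
  | c :: t => (c.toNat : Int) * 1114112 ^ t.length + pvVal t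

lemma pvVal_append_singleton (u : List Char) (c : Char) :
    pvVal (u ++ [c]) = pvVal u * 1114112 + (c.toNat : Int) := by
  induction u with
  | nil => simp [pvVal]
  | cons d t ih =>
      simp [pvVal, ih]
      ring

lemma pvChar_lt (c : Char) : c.toNat < 1114112 := by
  have h := c.valid
  rcases h with h | ⟨_, h⟩
  · exact Nat.lt_trans (by exact_mod_cast h) (by norm_num)
  · exact_mod_cast h

lemma pvVal_nonneg (u : List Char) : 0 ≤ pvVal u := by
  induction u with
  | nil => simp [pvVal]
  | cons c t ih =>
      have h1 : (0:Int) ≤ (c.toNat : Int) * 1114112 ^ t.length := by positivity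
      simp only [pvVal]; omega

lemma pvVal_lt (u : List Char) : pvVal u < 1114112 ^ u.length := by
  induction u with
  | nil => simp [pvVal]
  | cons c t ih =>
      have hc : (c.toNat : Int) ≤ 1114111 := by
        have := pvChar_lt c; omega
      have hp : (0:Int) < 1114112 ^ t.length := by positivity
      calc pvVal (c :: t) = (c.toNat : Int) * 1114112 ^ t.length + pvVal t := rfl
        _ < (c.toNat : Int) * 1114112 ^ t.length + 1114112 ^ t.length := by omega
        _ = ((c.toNat : Int) + 1) * 1114112 ^ t.length := by ring
        _ ≤ 1114112 * 1114112 ^ t.length := by nlinarith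
        _ = 1114112 ^ (t.length + 1) := by ring
        _ = 1114112 ^ (c :: t).length := by simp

lemma pvVal_inj (u v : List Char) (hlen : u.length = v.length) (h : pvVal u = pvVal v) : u = v := by
  induction u generalizing v with
  | nil => cases v with
      | nil => rfl
      | cons d s => simp at hlen
  | cons c t ih =>
      cases v with
      | nil => simp at hlen
      | cons d s =>
          have hl : t.length = s.length := by simpa using hlen
          have hv : (c.toNat : Int) * 1114112 ^ t.length + pvVal t
              = (d.toNat : Int) * 1114112 ^ t.length + pvVal s := by
            simpa [pvVal, hl] using h
          have h1 := pvVal_nonneg t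
          have h2 := pvVal_nonneg s
          have h3 := pvVal_lt t
          have h4 := pvVal_lt s
          have hcd : c.toNat = d.toNat := by
            by_contra hne
            have hp : (0:Int) < 1114112 ^ t.length := by positivity
            rcases Nat.lt_or_ge c.toNat d.toNat with hlt | hge
            · have : ((c.toNat : Int) + 1) ≤ (d.toNat : Int) := by exact_mod_cast hlt
              nlinarith [h3, h2]
            · have hlt' : d.toNat < c.toNat := by omega
              have : ((d.toNat : Int) + 1) ≤ (c.toNat : Int) := by exact_mod_cast hlt'
              have h4' : pvVal s < 1114112 ^ t.length := by rw [hl]; exact h4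
              nlinarith [h4', h1]
          have hc : c = d := Char.ext (by
            have : c.val.toNat = d.val.toNat := hcd
            exact UInt32.toNat_inj.mp this)
          have ht : t = s := ih s hl (by
            have hv' := hv
            rw [hcd] at hv'
            omega)
          rw [hc, ht]

-- f = r ↔ the processed chunk (read back-to-front) is a palindrome
lemma pvVal_eq_iff_pal (u : List Char) : pvVal u.reverse = pvVal u ↔ u.reverse = u := by
  constructor
  · intro h; exact pvVal_inj _ _ (by simp) h
  · intro h; rw [h]

-- palindromic-length list of the processed chunk u (chars arrive reversed)
def pvLens (u : List Char) : List Int :=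
  (List.range u.length).filterMap
    (fun j => if pvVal ((u.take (j+1)).reverse) = pvVal (u.take (j+1)) then some ((j : Int) + 1) else none)

lemma pvLens_append_singleton (u : List Char) (c : Char) :
    pvLens (u ++ [c]) =
      if pvVal ((u ++ [c]).reverse) = pvVal (u ++ [c]) then pvLens u ++ [((u.length : Int) + 1)]
      else pvLens u := by
  have hlen : (u ++ [c]).length = u.length + 1 := by simp
  have h2 : (u ++ [c]).take (u.length + 1) = u ++ [c] := by
    apply List.take_of_length_le; simp
  have h1 : (List.range u.length).filterMap
      (fun j => if pvVal (((u ++ [c]).take (j+1)).reverse) = pvVal ((u ++ [c]).take (j+1))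
                then some ((j : Int) + 1) else none)
      = (List.range u.length).filterMap
      (fun j => if pvVal ((u.take (j+1)).reverse) = pvVal (u.take (j+1))
                then some ((j : Int) + 1) else none) := by
    apply List.filterMap_congr
    intro j hj
    have hle : j + 1 ≤ u.length := by
      simp only [List.mem_range] at hj; omega
    rw [List.take_append_of_le_length hle]
  have h3 : (List.filterMap
      (fun j => if pvVal (((u ++ [c]).take (j+1)).reverse) = pvVal ((u ++ [c]).take (j+1))
                then some ((j : Int) + 1) else none) [u.length])
      = if pvVal ((u ++ [c]).reverse) = pvVal (u ++ [c]) then [((u.length : Int) + 1)] else [] := by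
    by_cases h : pvVal ((u ++ [c]).reverse) = pvVal (u ++ [c])
    · have h' : pvVal (c :: u.reverse) = pvVal (u ++ [c]) := by
        simpa [List.reverse_append] using h
      rw [if_pos h]
      simp [h2, List.reverse_append, h']
    · have h' : ¬ pvVal (c :: u.reverse) = pvVal (u ++ [c]) := by
        intro hc
        exact h (by simpa [List.reverse_append] using hc)
      rw [if_neg h]
      simp [h2, List.reverse_append, h']
  unfold pvLens
  rw [hlen, List.range_succ, List.filterMap_append, h1, h3]
  split_ifs with h <;> simp

lemma pvLoop_inv (u : List Char) :
    u.foldl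
      (fun (st : Int × Int × Int × Int × List Int) c =>
        let f := (c.toNat : Int) * st.2.2.1 + st.1
        let r := st.2.1 * 1114112 + (c.toNat : Int)
        let p := st.2.2.1 * 1114112
        let k := st.2.2.2.1 + 1
        let lens := if f = r then st.2.2.2.2 ++ [k] else st.2.2.2.2
        (f, r, p, k, lens))
      (0, 0, 1, 0, ([] : List Int))
    = (pvVal u.reverse, pvVal u, 1114112 ^ u.length, (u.length : Int), pvLens u) := by
  induction u using List.reverseRecOn with
  | nil => simp [pvVal, pvLens]
  | append_singleton u c ih =>
      rw [List.foldl_append, ih]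
      simp only [List.foldl_cons, List.foldl_nil]
      have hf : (c.toNat : Int) * 1114112 ^ u.length + pvVal u.reverse
          = pvVal ((u ++ [c]).reverse) := by
        simp [List.reverse_append, pvVal]
      have hr : pvVal u * 1114112 + (c.toNat : Int) = pvVal (u ++ [c]) :=
        (pvVal_append_singleton u c).symm
      have hp : 1114112 ^ u.length * 1114112 = (1114112 : Int) ^ (u ++ [c]).length := by
        simp only [List.length_append, List.length_cons, List.length_nil, pow_succ]
      have hk : (u.length : Int) + 1 = ((u ++ [c]).length : Int) := by
        simp only [List.length_append, List.length_cons, List.length_nil]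
        push_cast; ring
      rw [hf, hr, hp, pvLens_append_singleton u c, hk]

-- prop-valued variant of PySem.List.foldl_append_if
lemma pvFoldl_append_ite {α β : Type} (P : α → Prop) [DecidablePred P] (f : α → β)
    (l : List α) (acc : List β) :
    l.foldl (fun acc x => if P x then acc ++ [f x] else acc) acc
      = acc ++ (l.filter (fun x => decide (P x))).map f := by
  induction l generalizing acc with
  | nil => simp
  | cons x t ih =>
      simp only [List.foldl_cons, List.filter_cons]
      by_cases h : P x
      · simp [h, ih]
      · simp [h, ih]

lemma pvMap_filter {α β : Type} (P : α → Prop) [DecidablePred P] (g : α → β) (l : List α) :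
    (l.filter (fun x => decide (P x))).map g
      = l.filterMap (fun x => if P x then some (g x) else none) := by
  induction l with
  | nil => simp
  | cons x t ih =>
      simp only [List.filter_cons, List.filterMap_cons]
      by_cases h : P x
      · simp [h, ih]
      · simp [h, ih]

-- A's i-th suffix test equals the list-level palindrome test
lemma pvSubCond (word : String) (k : Nat) :
    (PySem.Str.slice word (some ((k : Nat) : Int)) none
      = (PySem.Str.slice? (PySem.Str.slice word (some ((k : Nat) : Int)) none) none none (-1)).getD "")
    ↔ (word.toList.drop k).reverse = word.toList.drop k := by
  set sub := PySem.Str.slice word (some ((k : Nat) : Int)) none with hsub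
  rw [PySem.Str.slice?_none_none_neg_one, Option.getD_some, String.ext_iff,
    String.toList_ofList]
  have hts : sub.toList = word.toList.drop k := by
    rw [hsub, PySem.Str.toList_slice, PySem.Chars.slice_eq_listSlice,
      PySem.List.slice_from_natCast]
  rw [hts]
  constructor
  · intro h; exact h.symm
  · intro h; exact h.symm

theorem all_valid_prefixes_spec : Claim_equal_all_valid_prefixes := by
  intro word _
  unfold Spec_all_valid_prefixes
  have hA : all_valid_prefixes word
      = (List.range word.toList.length).filterMap
          (fun k => if (word.toList.drop k).reverse = word.toList.drop k
                    then some (PySem.Str.slice word none (some (k : Int))) else none) := by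
    unfold all_valid_prefixes
    dsimp only
    rw [PySem.Str.len_eq, PySem.List.pyRange_one, List.foldl_map]
    have hnn : (((word.toList.length : Int)) - 0).toNat = word.toList.length := by omega
    rw [hnn]
    rw [pvFoldl_append_ite
      (fun (k : Nat) => PySem.Str.slice word (some ((0 : Int) + ((k : Nat) : Int))) none
        = (PySem.Str.slice? (PySem.Str.slice word (some ((0 : Int) + ((k : Nat) : Int))) none) none none (-1)).getD "")
      (fun (k : Nat) => PySem.Str.slice word none (some ((0 : Int) + ((k : Nat) : Int))))]
    rw [List.nil_append, pvMap_filter]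
    apply List.filterMap_congr
    intro k _
    have h0 : ((0 : Int) + ((k : Nat) : Int)) = ((k : Nat) : Int) := by ring
    rw [h0]
    by_cases h : (word.toList.drop k).reverse = word.toList.drop k
    · rw [if_pos ((pvSubCond word k).mpr h), if_pos h]
    · rw [if_neg (fun hc => h ((pvSubCond word k).mp hc)), if_neg h]
  have hB : all_valid_prefixes_alt word
      = (List.range word.toList.length).filterMap
          (fun k => if (word.toList.drop k).reverse = word.toList.drop k
                    then some (PySem.Str.slice word none (some (k : Int))) else none) := by
    set cs := word.toList with hcs
    set n := cs.length with hn
    have hstep : all_valid_prefixes_alt word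
        = ((pvLens cs.reverse).reverse).map
            (fun L => PySem.Str.slice word none (some ((n : Int) - L))) := by
      unfold all_valid_prefixes_alt
      dsimp only
      rw [pvLoop_inv (word.toList.reverse)]
      rw [PySem.List.foldl_append_singleton_eq_map, List.nil_append, PySem.Str.len_eq]
    rw [hstep]
    have hlenrev : cs.reverse.length = n := by simp [hn]
    have hlens : pvLens cs.reverse
        = (List.range n).filterMap
            (fun j => if (cs.drop (n - (j+1))).reverse = cs.drop (n - (j+1))
                      then some ((j : Int) + 1) else none) := by
      unfold pvLens
      rw [hlenrev]
      apply List.filterMap_congr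
      intro j hj
      have hj' : j < n := List.mem_range.mp hj
      have htk : cs.reverse.take (j+1) = (cs.drop (n - (j+1))).reverse := by
        rw [List.take_reverse, hn]
      have hcond : pvVal ((cs.reverse.take (j+1)).reverse) = pvVal (cs.reverse.take (j+1))
          ↔ (cs.drop (n - (j+1))).reverse = cs.drop (n - (j+1)) := by
        rw [pvVal_eq_iff_pal, htk, List.reverse_reverse]
        constructor
        · intro h; exact h.symm
        · intro h; exact h.symm
      by_cases h : (cs.drop (n - (j+1))).reverse = cs.drop (n - (j+1))
      · rw [if_pos (hcond.mpr h), if_pos h]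
      · rw [if_neg (fun hc => h (hcond.mp hc)), if_neg h]
    rw [hlens, ← List.filterMap_reverse, List.map_filterMap]
    have hrev : (List.range n).reverse = (List.range n).map (fun j => n - 1 - j) := by
      rw [List.range_eq_range', List.reverse_range', ← List.range_eq_range']
      simp
    rw [hrev, List.filterMap_map]
    apply List.filterMap_congr
    intro k hk
    have hk' : k < n := List.mem_range.mp hk
    simp only [Function.comp]
    have e1 : n - (n - 1 - k + 1) = k := by omega
    rw [e1]
    by_cases h : (cs.drop k).reverse = cs.drop k
    · rw [if_pos h, if_pos h, Option.map_some]
      have e2 : (n : Int) - (((n - 1 - k : Nat) : Int) + 1) = (k : Int) := by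
        push_cast [Nat.sub_sub]
        omega
      rw [e2]
    · rw [if_neg h, if_neg h, Option.map_none]
  rw [hA, hB]
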